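-- pv_equiv track=rewrite | github.com/Sakae-o/Software-Engineering-Assignment1 | segmentation.py | delete_strings
-- ===== SOURCE A (Python) =====
-- def delete_strings(list):
--     '''
--     Delete the two quotation marks, which has been replaced
--     with "@",  and delete all the words between them.
--     '''
--     if (list.count("@") <= 1):
--         return list
--     flag = 0
--     new_list = []
--     for i in list:
--         if (flag == 0):
--             if (i == "@"):
--                 flag = 1
--             else:
--                 new_list.append(i)
--         elif (flag == 1):
--             if (i == "@"):
--                 flag = 0
--     return new_list
-- ===== SOURCE B (Python) =====
-- def delete_strings(list):
--     if list.count("@") <= 1: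
--         return list
--     # split into segments at each "@", then keep the even-indexed segments
--     segments = []
--     buf = []
--     for i in list:
--         if i == "@":
--             segments.append(buf)
--             buf = []
--         else:
--             buf.append(i)
--     segments.append(buf)
--     out = []
--     while segments:
--         out += segments[0]
--         segments = segments[2:]
--     return out
-- ===== Notes on version B (the rewrite author's own statement) =====
-- stated objective: alternative
-- what changed: Replaces the flag toggle state machine with a split-on-'@' into segments followed by concatenating the even-indexed segments.
import Mathlib
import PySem

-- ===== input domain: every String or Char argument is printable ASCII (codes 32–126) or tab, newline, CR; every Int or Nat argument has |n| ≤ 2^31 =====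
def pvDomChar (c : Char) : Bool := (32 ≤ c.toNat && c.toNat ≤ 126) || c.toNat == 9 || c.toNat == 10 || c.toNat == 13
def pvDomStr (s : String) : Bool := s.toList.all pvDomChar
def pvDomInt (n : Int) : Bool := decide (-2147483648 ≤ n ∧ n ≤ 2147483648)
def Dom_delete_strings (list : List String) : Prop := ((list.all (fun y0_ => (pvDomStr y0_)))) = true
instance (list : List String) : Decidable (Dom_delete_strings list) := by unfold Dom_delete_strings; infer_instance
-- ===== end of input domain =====

-- B replaces A's flag-toggling state machine by splitting the list on "@" into segments
-- and concatenating the even-indexed segments (objective: alternative decomposition).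

-- ===== PORT A =====
-- one loop iteration of A: state is (flag, new_list)
def pvStepA (st : Int × List String) (i : String) : Int × List String :=
  if st.1 = 0 then
    (if i = "@" then (1, st.2) else (0, st.2 ++ [i]))
  else if st.1 = 1 then
    (if i = "@" then (0, st.2) else st)
  else st

def delete_strings (list : List String) : List String :=
  if PySem.List.count list "@" ≤ 1 then list
  else (list.foldl pvStepA (0, [])).2

-- ===== PORT B =====
-- one loop iteration of B's split phase: state is (segments, buf)
def pvStepB (st : List (List String) × List String) (i : String) : List (List String) × List String :=
  if i = "@" then (st.1 ++ [st.2], []) else (st.1, st.2 ++ [i])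

-- the 'while segments: out += segments[0]; segments = segments[2:]' loop of Source B
def pvCatEven (segments : List (List String)) (out : List String) : List String :=
  match segments with
  | [] => out
  | x :: rest => pvCatEven (rest.drop 1) (out ++ x)
termination_by segments.length
decreasing_by simp

def delete_strings_alt (list : List String) : List String :=
  if PySem.List.count list "@" ≤ 1 then list
  else
    let st := list.foldl pvStepB ([], [])
    pvCatEven (st.1 ++ [st.2]) []

-- ===== PRECONDITION & SPEC =====
def Spec_delete_strings (list : List String) (out : List String) : Prop := out = delete_strings_alt list
instance (list : List String) (out : List String) : Decidable (Spec_delete_strings list out) := by unfold Spec_delete_strings; infer_instance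

-- ===== CLAIM (what is proved, stated in full; the proofs are below) =====
def Claim_equal_delete_strings : Prop := ∀ (list : List String), Dom_delete_strings list → Spec_delete_strings list (delete_strings list)

-- ===== LEMMAS AND PROOFS =====

-- concatenation of the even-indexed segments (proof-side characterisation of pvCatEven)
def pvEC : List (List String) → List String
  | [] => []
  | [x] => x
  | x :: _ :: rest => x ++ pvEC rest

def pvFlagOf (segs : List (List String)) : Int :=
  if segs.length % 2 = 0 then 0 else 1

theorem pvCatEven_eq (segments : List (List String)) (out : List String) :
    pvCatEven segments out = out ++ pvEC segments := by
  induction segments, out using pvCatEven.induct with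
  | case1 out => simp [pvCatEven, pvEC]
  | case2 out x rest ih =>
    cases rest with
    | nil => simp [pvCatEven, pvEC]
    | cons y rest' =>
      simp only [pvCatEven, List.drop_succ_cons, List.drop_zero] at *
      rw [ih]
      simp [pvEC]

theorem pvEC_append_nil (xs : List (List String)) :
    pvEC (xs ++ [[]]) = pvEC xs := by
  induction xs using pvEC.induct with
  | case1 => simp [pvEC]
  | case2 x => simp [pvEC]
  | case3 x y rest ih => simpa [pvEC] using ih

theorem pvEC_append_last (xs : List (List String)) (b : List String) (i : String) :
    pvEC (xs ++ [b ++ [i]]) =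
      pvEC (xs ++ [b]) ++ (if xs.length % 2 = 0 then [i] else []) := by
  induction xs using pvEC.induct with
  | case1 => simp [pvEC]
  | case2 x => simp [pvEC]
  | case3 x y rest ih =>
    by_cases hp : rest.length % 2 = 0
    · have h2 : (rest.length + 1 + 1) % 2 = 0 := by omega
      simp [pvEC, ih, hp, h2]
    · have h2 : (rest.length + 1 + 1) % 2 = 1 := by omega
      simp [pvEC, ih, hp, h2]

theorem pvLoop (l : List String) :
    ∀ (segs : List (List String)) (buf : List String),
      l.foldl pvStepA (pvFlagOf segs, pvEC (segs ++ [buf]))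
        = (pvFlagOf (l.foldl pvStepB (segs, buf)).1,
           pvEC ((l.foldl pvStepB (segs, buf)).1 ++ [(l.foldl pvStepB (segs, buf)).2])) := by
  induction l with
  | nil => intro segs buf; simp
  | cons i l ih =>
    intro segs buf
    simp only [List.foldl_cons]
    by_cases hi : i = "@"
    · have hA : pvStepA (pvFlagOf segs, pvEC (segs ++ [buf])) i
          = (pvFlagOf (segs ++ [buf]), pvEC ((segs ++ [buf]) ++ [[]])) := by
        simp only [pvStepA, pvFlagOf, hi]
        rw [pvEC_append_nil]
        have h1 : (segs ++ [buf]).length % 2 = (segs.length + 1) % 2 := by simp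
        by_cases hp : segs.length % 2 = 0
        · have : (segs.length + 1) % 2 = 1 := by omega
          simp [hp, this]
        · have h0 : segs.length % 2 = 1 := by omega
          have : (segs.length + 1) % 2 = 0 := by omega
          simp [hp, this]
      have hB : pvStepB (segs, buf) i = (segs ++ [buf], []) := by
        simp [pvStepB, hi]
      rw [hA, hB, ih]
    · have hB : pvStepB (segs, buf) i = (segs, buf ++ [i]) := by
        simp [pvStepB, hi]
      have hA : pvStepA (pvFlagOf segs, pvEC (segs ++ [buf])) i
          = (pvFlagOf segs, pvEC (segs ++ [buf ++ [i]])) := by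
        simp only [pvStepA, pvFlagOf, hi]
        rw [pvEC_append_last]
        by_cases hp : segs.length % 2 = 0 <;> simp [hp]
      rw [hA, hB, ih]

-- ===== VERDICT (by name: the statement is the Claim_ definition above) =====
theorem delete_strings_spec : Claim_equal_delete_strings := by
  intro list _
  unfold Spec_delete_strings delete_strings delete_strings_alt
  split_ifs with h
  · rfl
  · have := pvLoop list [] []
    have h0 : pvFlagOf ([] : List (List String)) = 0 := by simp [pvFlagOf]
    have h1 : pvEC (([] : List (List String)) ++ [[]]) = [] := by simp [pvEC]
    rw [h0, h1] at this
    rw [this, pvCatEven_eq]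
    simp
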